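-- pv_equiv track=rewrite | github.com/iancontijoch/aoc2023 | day10/part2.py | format_coords_hash
-- ===== SOURCE A (Python) =====
-- def format_coords_hash(coords: dict[tuple[int, int], str]) -> str:
--     min_x = min(x for x, _ in coords)
--     max_x = max(x for x, _ in coords)
--     min_y = min(y for _, y in coords)
--     max_y = max(y for _, y in coords)
--     return '\n'.join(
--         ''.join(
--             coords[(x, y)] if (x, y) in coords else ' '
--             for x in range(min_x, max_x + 1)
--         )
--         for y in range(min_y, max_y + 1)
--     )
-- ===== SOURCE B (Python) =====
-- def format_coords_hash(coords: dict[tuple[int, int], str]) -> str: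
--     xs = [x for x, _ in coords]
--     ys = [y for _, y in coords]
--     min_x, min_y = min(xs), min(ys)
--     width = max(xs) - min_x + 1
--     grid = [[' '] * width for _ in range(max(ys) - min_y + 1)]
--     for (x, y), ch in coords.items():
--         grid[y - min_y][x - min_x] = ch
--     return '\n'.join(''.join(row) for row in grid)
-- ===== Notes on version B (the rewrite author's own statement) =====
-- stated objective: alternative
-- what changed: B preallocates a (max_y-min_y+1) x (max_x-min_x+1) grid of spaces and scatters the N dict entries into it by index, instead of scanning every cell of the bounding box and testing dict membership per cell; the per-cell membership test is gone.
import Mathlib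
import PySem

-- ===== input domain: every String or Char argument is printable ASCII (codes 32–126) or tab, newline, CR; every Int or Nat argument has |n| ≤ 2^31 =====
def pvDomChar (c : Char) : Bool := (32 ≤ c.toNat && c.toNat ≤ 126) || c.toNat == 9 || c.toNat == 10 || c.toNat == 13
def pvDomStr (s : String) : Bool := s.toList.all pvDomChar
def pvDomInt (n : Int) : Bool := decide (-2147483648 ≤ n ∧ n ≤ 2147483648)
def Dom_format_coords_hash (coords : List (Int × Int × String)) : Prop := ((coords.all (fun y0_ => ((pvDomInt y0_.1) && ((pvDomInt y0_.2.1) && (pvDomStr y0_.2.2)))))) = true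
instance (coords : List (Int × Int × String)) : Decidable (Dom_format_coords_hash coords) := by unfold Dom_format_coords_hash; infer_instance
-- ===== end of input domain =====

-- B fills a preallocated grid of spaces by scattering the dict entries (index writes),
-- instead of A's per-cell membership test over the whole bounding box; return values proved equal.


-- ===== PORT A =====
-- min/max over the dict's keys: duplicated keys in the association list do not change extrema,
-- so the min/max are taken over the item list directly.
def format_coords_hash (coords : List (Int × Int × String)) : String :=
  match PySem.List.min? (coords.map (fun p => p.1)) (fun v => v),
        PySem.List.max? (coords.map (fun p => p.1)) (fun v => v),
        PySem.List.min? (coords.map (fun p => p.2.1)) (fun v => v),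
        PySem.List.max? (coords.map (fun p => p.2.1)) (fun v => v) with
  | some min_x, some max_x, some min_y, some max_y =>
      let d : PySem.Dict (Int × Int) String :=
        PySem.Dict.ofList (coords.map (fun p => ((p.1, p.2.1), p.2.2)))
      PySem.Str.join "\n"
        ((PySem.List.pyRange min_y (max_y + 1) 1).map (fun y =>
          PySem.Str.join ""
            ((PySem.List.pyRange min_x (max_x + 1) 1).map (fun x =>
              -- coords[(x, y)] if (x, y) in coords else ' '
              d.getD (x, y) " "))))
  | _, _, _, _ => ""   -- unreachable under Pre_ (empty coords: min raises ValueError)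

-- ===== PORT B =====
def format_coords_hash_alt (coords : List (Int × Int × String)) : String :=
  let xs := coords.map (fun p => p.1)
  let ys := coords.map (fun p => p.2.1)
  match PySem.List.min? xs (fun v => v) with
  | none => ""   -- unreachable under Pre_ (min of an empty sequence raises)
  | some min_x =>
  match PySem.List.min? ys (fun v => v) with
  | none => ""
  | some min_y =>
  match PySem.List.max? xs (fun v => v) with
  | none => ""
  | some max_x =>
  match PySem.List.max? ys (fun v => v) with
  | none => ""
  | some max_y =>
      let width := (max_x - min_x + 1).toNat
      let grid0 : List (List String) :=
        List.replicate (max_y - min_y + 1).toNat (List.replicate width " ")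
      -- for (x, y), ch in coords.items(): grid[y - min_y][x - min_x] = ch
      let grid := coords.foldl (fun g p =>
        g.modify (p.2.1 - min_y).toNat (fun row => row.set (p.1 - min_x).toNat p.2.2)) grid0
      PySem.Str.join "\n" (grid.map (fun row => PySem.Str.join "" row))

-- ===== PRECONDITION & SPEC =====
-- Python's min/max raise ValueError on an empty dict, so the empty list is excluded.
def Pre_format_coords_hash (coords : List (Int × Int × String)) : Prop := coords ≠ []
instance (coords : List (Int × Int × String)) : Decidable (Pre_format_coords_hash coords) := by unfold Pre_format_coords_hash; infer_instance
def pvWitness_format_coords_hash : (List (Int × Int × String)) := [(0, 0, "#"), (2, 1, "x")]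

def Spec_format_coords_hash (coords : List (Int × Int × String)) (out : String) : Prop := out = format_coords_hash_alt coords
instance (coords : List (Int × Int × String)) (out : String) : Decidable (Spec_format_coords_hash coords out) := by unfold Spec_format_coords_hash; infer_instance

-- ===== CLAIM (what is proved, stated in full; the proofs are below) =====
def Claim_equal_format_coords_hash : Prop := ∀ (coords : List (Int × Int × String)), Dom_format_coords_hash coords → Pre_format_coords_hash coords → Spec_format_coords_hash coords (format_coords_hash coords)

-- ===== LEMMAS AND PROOFS =====

-- The rows A produces from a dict d, as lists of cell strings.
def pvRowsOf (min_x max_x min_y max_y : Int) (d : PySem.Dict (Int × Int) String) : List (List String) :=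
  (PySem.List.pyRange min_y (max_y + 1) 1).map (fun y =>
    (PySem.List.pyRange min_x (max_x + 1) 1).map (fun x => d.getD (x, y) " "))

theorem pvRowsOf_empty (min_x max_x min_y max_y : Int) :
    pvRowsOf min_x max_x min_y max_y PySem.Dict.empty
      = List.replicate (max_y - min_y + 1).toNat
          (List.replicate (max_x - min_x + 1).toNat " ") := by
  unfold pvRowsOf
  simp [PySem.Dict.getD_empty, List.map_const', PySem.List.length_pyRange_one]
  omega

-- One scatter write updates the dict picture by one insert (indices stay in range).
theorem pvScatter_step (min_x max_x min_y max_y x0 y0 : Int) (v : String)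
    (d : PySem.Dict (Int × Int) String)
    (hx1 : min_x ≤ x0) (_hx2 : x0 ≤ max_x) (hy1 : min_y ≤ y0) (_hy2 : y0 ≤ max_y) :
    (pvRowsOf min_x max_x min_y max_y d).modify (y0 - min_y).toNat
        (fun row => row.set (x0 - min_x).toNat v)
      = pvRowsOf min_x max_x min_y max_y (d.insert (x0, y0) v) := by
  apply List.ext_getElem
  · simp [pvRowsOf]
  · intro i hi hi'
    rw [List.getElem_modify]
    have hi0 : i < (pvRowsOf min_x max_x min_y max_y d).length := by simpa using hi
    have hlen : (pvRowsOf min_x max_x min_y max_y d).length = (max_y + 1 - min_y).toNat := by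
      simp [pvRowsOf, PySem.List.length_pyRange_one]
    have hiy : i < (max_y + 1 - min_y).toNat := by rw [← hlen]; exact hi0
    have hrow : ∀ (e : PySem.Dict (Int × Int) String) (h : i < (pvRowsOf min_x max_x min_y max_y e).length),
        (pvRowsOf min_x max_x min_y max_y e)[i] =
          (PySem.List.pyRange min_x (max_x + 1) 1).map (fun x => e.getD (x, min_y + i) " ") := by
      intro e h
      simp [pvRowsOf, PySem.List.getElem_pyRange_one]
    rw [hrow d hi0, hrow (d.insert (x0, y0) v) hi']
    by_cases hiy0 : (y0 - min_y).toNat = i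
    · simp only [if_pos hiy0]
      have hy : min_y + (i : Int) = y0 := by omega
      apply List.ext_getElem
      · simp
      · intro j hj hj'
        rw [List.getElem_set]
        simp only [List.getElem_map, PySem.List.getElem_pyRange_one]
        have hjx : j < (max_x + 1 - min_x).toNat := by
          simpa [PySem.List.length_pyRange_one] using hj'
        rw [PySem.Dict.getD_insert]
        by_cases hjx0 : (x0 - min_x).toNat = j
        · have hx : min_x + (j : Int) = x0 := by omega
          simp [hjx0, hx, hy]
        · have hx : min_x + (j : Int) ≠ x0 := by omega
          simp [hjx0, Prod.ext_iff, hx]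
    · simp only [if_neg hiy0]
      have hy : min_y + (i : Int) ≠ y0 := by omega
      apply List.map_congr_left
      intro x hx
      rw [PySem.Dict.getD_insert]
      simp [Prod.ext_iff, hy]

-- The whole scatter loop produces the rows of the dict built by the same inserts.
theorem pvScatter_eq (min_x max_x min_y max_y : Int) (l : List (Int × Int × String))
    (d : PySem.Dict (Int × Int) String)
    (hb : ∀ p ∈ l, min_x ≤ p.1 ∧ p.1 ≤ max_x ∧ min_y ≤ p.2.1 ∧ p.2.1 ≤ max_y) :
    l.foldl (fun g p =>
        g.modify (p.2.1 - min_y).toNat (fun row => row.set (p.1 - min_x).toNat p.2.2))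
        (pvRowsOf min_x max_x min_y max_y d)
      = pvRowsOf min_x max_x min_y max_y
          (l.foldl (fun e p => e.insert (p.1, p.2.1) p.2.2) d) := by
  induction l generalizing d with
  | nil => rfl
  | cons p t ih =>
    obtain ⟨h1, h2, h3, h4⟩ := hb p (List.mem_cons_self ..)
    simp only [List.foldl_cons]
    rw [pvScatter_step min_x max_x min_y max_y p.1 p.2.1 p.2.2 d h1 h2 h3 h4]
    exact ih _ (fun q hq => hb q (List.mem_cons_of_mem _ hq))

theorem pvDict_ofList_eq_foldl (l : List (Int × Int × String)) :
    PySem.Dict.ofList (l.map (fun p => ((p.1, p.2.1), p.2.2)))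
      = l.foldl (fun e p => e.insert (p.1, p.2.1) p.2.2) PySem.Dict.empty := by
  simp [PySem.Dict.ofList, PySem.Dict.update, List.foldl_map]

-- ===== VERDICT (by name: the statement is the Claim_ definition above) =====
theorem format_coords_hash_spec : Claim_equal_format_coords_hash := by
  intro coords _ hpre
  unfold Spec_format_coords_hash format_coords_hash format_coords_hash_alt
  have hxs : coords.map (fun p => p.1) ≠ [] := by simpa using hpre
  have hys : coords.map (fun p => p.2.1) ≠ [] := by simpa using hpre
  obtain ⟨min_x, hminx⟩ := Option.ne_none_iff_exists'.mp
    (fun h => hxs ((PySem.List.min?_eq_none_iff (coords.map (fun p => p.1)) (fun v : Int => v)).mp h))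
  obtain ⟨max_x, hmaxx⟩ := Option.ne_none_iff_exists'.mp
    (fun h => hxs ((PySem.List.max?_eq_none_iff (coords.map (fun p => p.1)) (fun v : Int => v)).mp h))
  obtain ⟨min_y, hminy⟩ := Option.ne_none_iff_exists'.mp
    (fun h => hys ((PySem.List.min?_eq_none_iff (coords.map (fun p => p.2.1)) (fun v : Int => v)).mp h))
  obtain ⟨max_y, hmaxy⟩ := Option.ne_none_iff_exists'.mp
    (fun h => hys ((PySem.List.max?_eq_none_iff (coords.map (fun p => p.2.1)) (fun v : Int => v)).mp h))
  simp only [hminx, hmaxx, hminy, hmaxy]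
  have hb : ∀ p ∈ coords, min_x ≤ p.1 ∧ p.1 ≤ max_x ∧ min_y ≤ p.2.1 ∧ p.2.1 ≤ max_y := by
    intro p hp
    exact ⟨PySem.List.min?_isMin hminx _ (List.mem_map_of_mem hp),
           PySem.List.max?_isMax hmaxx _ (List.mem_map_of_mem hp),
           PySem.List.min?_isMin hminy _ (List.mem_map_of_mem hp),
           PySem.List.max?_isMax hmaxy _ (List.mem_map_of_mem hp)⟩
  rw [← pvRowsOf_empty min_x max_x min_y max_y,
      pvScatter_eq min_x max_x min_y max_y coords PySem.Dict.empty hb,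
      pvDict_ofList_eq_foldl]
  simp only [pvRowsOf, List.map_map]
  rfl
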